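-- pv_equiv track=rewrite | github.com/lost-person/leet-code | company/扇面涂色.py | backtrack
-- ===== SOURCE A (Python) =====
-- def backtrack(n, m):
--     if n == 1:
--         return m
--     if n == 2:
--         if m < 2:
--             return 0
--         else:
--             return m * (m - 1)
--
--     return m * (m - 1)**(n - 1) - backtrack(n - 1, m)
-- ===== SOURCE B (Python) =====
-- def backtrack(n, m):
--     # Closed form of the circular-coloring recurrence: (m-1)^n + (-1)^n * (m-1).
--     if n == 1:
--         return m
--     return (m - 1) ** n + (-1) ** n * (m - 1)
-- ===== Notes on version B (the rewrite author's own statement) =====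
-- stated objective: faster
-- what changed: Replaces the O(n)-depth recursion (with a fresh big power at each level) by the closed form (m-1)^n + (-1)^n*(m-1), a single exponentiation.
-- outside the precondition, e.g. on backtrack(2, -1): A returns 0, B returns 2; on backtrack(3, -1): A returns -4, B returns -6
import Mathlib
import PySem

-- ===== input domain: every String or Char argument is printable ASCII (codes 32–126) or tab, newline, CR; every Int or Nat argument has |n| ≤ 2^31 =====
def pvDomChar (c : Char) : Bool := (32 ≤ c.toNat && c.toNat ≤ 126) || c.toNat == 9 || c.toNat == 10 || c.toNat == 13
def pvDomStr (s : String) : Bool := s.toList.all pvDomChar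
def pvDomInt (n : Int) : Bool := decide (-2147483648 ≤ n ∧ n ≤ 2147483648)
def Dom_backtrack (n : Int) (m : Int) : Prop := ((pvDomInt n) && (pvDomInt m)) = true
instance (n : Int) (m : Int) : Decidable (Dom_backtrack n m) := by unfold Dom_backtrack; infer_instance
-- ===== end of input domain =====

-- B replaces A's O(n)-deep recursion by the closed form (m-1)^n + (-1)^n*(m-1) (one exponentiation).


-- ===== PORT A =====
-- A recurses on n downwards to the base cases n = 1 and n = 2; we transcribe that
-- recursion structurally on n.toNat (Pre_ requires 1 ≤ n, where toNat is exact; the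
-- k+3 pattern's exponent k+2 is exactly Python's n-1 there).
def backtrackA (k : Nat) (m : Int) : Int :=
  match k with
  | 0 => 0              -- n ≤ 0: Python never returns (float / infinite recursion); excluded by Pre_
  | 1 => m
  | 2 => if m < 2 then 0 else m * (m - 1)
  | (j+3) => m * (m - 1) ^ (j + 2) - backtrackA (j + 2) m

def backtrack (n : Int) (m : Int) : Int := backtrackA n.toNat m

-- ===== PORT B =====
def backtrack_alt (n : Int) (m : Int) : Int :=
  if n == 1 then m
  else (m - 1) ^ n.toNat + (-1 : Int) ^ n.toNat * (m - 1)

-- ===== PRECONDITION & SPEC =====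
-- Pre_ excludes n < 1, on which A returns a float (n = 0: negative exponent) or raises
-- RecursionError, and m < 0, outside the natural domain of colour counts, where A's
-- hard-coded 0 at the n = 2 base (m < 2) is an arbitrary value B does not reproduce.
def Pre_backtrack (n : Int) (m : Int) : Prop := 1 ≤ n ∧ 0 ≤ m
instance (n : Int) (m : Int) : Decidable (Pre_backtrack n m) := by unfold Pre_backtrack; infer_instance
def pvWitness_backtrack : Int × Int := (4, 3)

def Spec_backtrack (n : Int) (m : Int) (out : Int) : Prop := out = backtrack_alt n m
instance (n : Int) (m : Int) (out : Int) : Decidable (Spec_backtrack n m out) := by unfold Spec_backtrack; infer_instance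

-- ===== CLAIM (what is proved, stated in full; the proofs are below) =====
def Claim_equal_backtrack : Prop := ∀ (n : Int) (m : Int), Dom_backtrack n m → Pre_backtrack n m → Spec_backtrack n m (backtrack n m)

-- ===== LEMMAS AND PROOFS =====

-- closed form for the A-side recursion from the n = 2 base, for m ≥ 0
theorem backtrackA_closed (k : Nat) (m : Int) (hm : 0 ≤ m) :
    backtrackA (k + 2) m = (m - 1) ^ (k + 2) + (-1 : Int) ^ (k + 2) * (m - 1) := by
  induction k with
  | zero =>
      simp only [backtrackA]
      split_ifs with h
      · interval_cases m <;> norm_num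
      · ring
  | succ j ih =>
      show backtrackA (j + 3) m = _
      simp only [backtrackA, ih]
      ring

-- ===== VERDICT (by name: the statement is the Claim_ definition above) =====
theorem backtrack_spec : Claim_equal_backtrack := by
  intro n m _ hpre
  obtain ⟨hn, hm⟩ := hpre
  unfold Spec_backtrack backtrack backtrack_alt
  by_cases h1 : n = 1
  · subst h1; simp [backtrackA]
  · have h2 : 2 ≤ n := by omega
    obtain ⟨k, hk⟩ : ∃ k : Nat, n.toNat = k + 2 := ⟨n.toNat - 2, by omega⟩
    rw [hk, backtrackA_closed k m hm]
    simp [h1]
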